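-- pv_equiv track=rewrite | github.com/asashepard/aspectcode | server/rules/test_no_assertions.py | _extract_js_callback_body
-- ===== SOURCE A (Python) =====
-- from typing import List, Set, Dict, Iterable, Optional
--
-- def _extract_js_callback_body(lines: List[str], start_line: int) -> List[str]:
--     """Extract JavaScript callback body (simplified)."""
--     body = []
--     brace_count = 0
--     found_start = False
--
--     for i in range(start_line, min(start_line + 20, len(lines))):
--         line = lines[i]
--         if '{' in line:
--             found_start = True
--         if found_start:
--             body.append(line)
--             brace_count += line.count('{') - line.count('}')
--             if brace_count <= 0 and found_start:
--                 break
--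
--     return body
-- ===== SOURCE B (Python) =====
-- from itertools import accumulate
--
-- def _extract_js_callback_body(lines, start_line):
--     """Extract JavaScript callback body (simplified)."""
--     idxs = range(start_line, min(start_line + 20, len(lines)))
--     starts = [i for i in idxs if '{' in lines[i]]
--     if not starts:
--         return []
--     s = starts[0]
--     tail = [lines[i] for i in idxs if i >= s]
--     depths = list(accumulate(l.count('{') - l.count('}') for l in tail))
--     cut = next((k for k, d in enumerate(depths) if d <= 0), len(tail) - 1)
--     return tail[:cut + 1]
-- ===== Notes on version B (the rewrite author's own statement) =====
-- stated objective: alternative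
-- what changed: Replaces A's single stateful loop (found_start flag, running brace_count, early break) by a data-flow pipeline: list comprehensions collect the candidate start indices and the tail lines, itertools.accumulate computes the brace-depth prefix sums, next/enumerate finds the cut index, and the result is a slice tail[:cut+1].
import Mathlib
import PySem

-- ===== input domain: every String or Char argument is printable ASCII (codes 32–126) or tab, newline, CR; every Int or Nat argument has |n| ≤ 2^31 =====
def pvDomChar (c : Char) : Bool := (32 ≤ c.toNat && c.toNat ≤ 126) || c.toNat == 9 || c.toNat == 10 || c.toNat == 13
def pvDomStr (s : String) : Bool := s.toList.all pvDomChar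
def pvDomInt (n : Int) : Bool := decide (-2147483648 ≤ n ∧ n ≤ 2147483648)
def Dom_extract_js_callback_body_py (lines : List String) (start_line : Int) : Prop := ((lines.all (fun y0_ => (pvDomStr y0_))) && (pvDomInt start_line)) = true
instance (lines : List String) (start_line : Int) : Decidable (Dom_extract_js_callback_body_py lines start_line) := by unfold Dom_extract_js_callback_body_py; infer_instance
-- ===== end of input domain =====

-- B replaces A's stateful break-loop by a data-flow pipeline: comprehensions, prefix sums (accumulate), find the cut index, slice (objective: alternative).

-- ===== PORT A =====
-- A's for-loop: state = (body, brace_count, found_start), iterating over the range list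
def pvALoop (lines : List String) : List Int → List String → Int → Bool → List String
  | [], body, _, _ => body
  | i :: rest, body, brace_count, found_start =>
    let line := PySem.List.pyGetD lines i ""
    let found_start' := found_start || PySem.Str.isIn "{" line
    if found_start' then
      let body' := body ++ [line]
      let brace_count' := brace_count + (PySem.Str.count line "{" : Int) - (PySem.Str.count line "}" : Int)
      if brace_count' ≤ 0 then body'
      else pvALoop lines rest body' brace_count' found_start'
    else pvALoop lines rest body brace_count found_start'

def extract_js_callback_body_py (lines : List String) (start_line : Int) : List String :=
  pvALoop lines (PySem.List.pyRange start_line (min (start_line + 20) (PySem.List.len lines)) 1) [] 0 false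

-- ===== PORT B =====
-- per-line brace delta: line.count('{') - line.count('}')
def pvDelta (line : String) : Int :=
  (PySem.Str.count line "{" : Int) - (PySem.Str.count line "}" : Int)

-- itertools.accumulate: running prefix sums starting from acc
def pvAccum : List Int → Int → List Int
  | [], _ => []
  | d :: rest, acc => (acc + d) :: pvAccum rest (acc + d)

def extract_js_callback_body_py_alt (lines : List String) (start_line : Int) : List String :=
  let idxs := PySem.List.pyRange start_line (min (start_line + 20) (PySem.List.len lines)) 1
  let starts := idxs.filter (fun i => PySem.Str.isIn "{" (PySem.List.pyGetD lines i ""))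
  match starts.head? with
  | none => []
  | some s =>
    let tail := (idxs.filter (fun i => decide (s ≤ i))).map (fun i => PySem.List.pyGetD lines i "")
    let depths := pvAccum (tail.map pvDelta) 0
    let cut := (depths.findIdx? (fun d => decide (d ≤ 0))).getD (tail.length - 1)
    tail.take (cut + 1)

-- ===== PRECONDITION & SPEC =====
-- Pre_ excludes exactly the inputs where Python A raises IndexError (start_line below -len(lines)); B raises there too.
def Pre_extract_js_callback_body_py (lines : List String) (start_line : Int) : Prop :=
  -(PySem.List.len lines) ≤ start_line

instance (lines : List String) (start_line : Int) : Decidable (Pre_extract_js_callback_body_py lines start_line) := by unfold Pre_extract_js_callback_body_py; infer_instance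

def pvWitness_extract_js_callback_body_py : List String × Int :=
  (["function foo() {", "  return 1;", "}", "done"], 0)

def Spec_extract_js_callback_body_py (lines : List String) (start_line : Int) (out : List String) : Prop := out = extract_js_callback_body_py_alt lines start_line
instance (lines : List String) (start_line : Int) (out : List String) : Decidable (Spec_extract_js_callback_body_py lines start_line out) := by unfold Spec_extract_js_callback_body_py; infer_instance

-- ===== CLAIM =====
def Claim_equal_extract_js_callback_body_py : Prop := ∀ (lines : List String) (start_line : Int), Dom_extract_js_callback_body_py lines start_line → Pre_extract_js_callback_body_py lines start_line → Spec_extract_js_callback_body_py lines start_line (extract_js_callback_body_py lines start_line)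

-- ===== LEMMAS AND PROOFS =====

-- recursive characterisation of " take until prefix sum ≤ 0 "
def pvCore : List String → Int → List String
  | [], _ => []
  | l :: rest, bc => if bc + pvDelta l ≤ 0 then [l] else l :: pvCore rest (bc + pvDelta l)

-- A's loop once found_start is true equals body ++ pvCore of the remaining lines
theorem pvALoop_true (lines : List String) :
    ∀ (js : List Int) (body : List String) (bc : Int),
    pvALoop lines js body bc true =
      body ++ pvCore (js.map (fun i => PySem.List.pyGetD lines i "")) bc := by
  intro js
  induction js with
  | nil => intro body bc; simp [pvALoop, pvCore]
  | cons i rest ih =>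
    intro body bc
    simp only [pvALoop, Bool.true_or, if_true, List.map_cons, pvCore, pvDelta, add_sub_assoc]
    split_ifs with h
    · simp
    · rw [ih]; simp

-- pvCore equals B's take-at-cut formulation
theorem pvCore_eq_take :
    ∀ (ls : List String) (bc : Int),
    pvCore ls bc =
      ls.take ((((pvAccum (ls.map pvDelta) bc)).findIdx? (fun d => decide (d ≤ 0))).getD
        (ls.length - 1) + 1) := by
  intro ls
  induction ls with
  | nil => intro bc; simp [pvCore]
  | cons l rest ih =>
    intro bc
    simp only [pvCore, List.map_cons, pvAccum, List.findIdx?_cons]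
    by_cases h : bc + pvDelta l ≤ 0
    · simp [h]
    · simp only [h, decide_false]
      rw [if_neg (by simp [h])]
      rw [ih (bc + pvDelta l)]
      cases (pvAccum (rest.map pvDelta) (bc + pvDelta l)).findIdx? (fun d => decide (d ≤ 0)) with
      | some k => simp [List.take_succ_cons]
      | none =>
        simp only [Option.map_none, Option.getD_none, List.length_cons]
        cases rest with
        | nil => simp
        | cons r rs => simp [List.take_succ_cons]

-- head? of filter = find?
theorem pvHead_filter {α : Type} (p : α → Bool) (l : List α) :
    (l.filter p).head? = l.find? p := by
  induction l with
  | nil => rfl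
  | cons a t ih =>
    by_cases h : p a = true
    · simp [h]
    · simp [h, ih]

-- filtering a range by (s ≤ ·) with s ≤ a keeps everything
theorem pvFilter_range_all (s : Int) :
    ∀ (n : Nat) (a e : Int), (e - a).toNat = n → s ≤ a →
    (PySem.List.pyRange a e 1).filter (fun i => decide (s ≤ i)) = PySem.List.pyRange a e 1 := by
  intro n
  induction n with
  | zero =>
    intro a e ha _
    rw [PySem.List.pyRange_one_eq_nil (by omega)]; rfl
  | succ n ih =>
    intro a e ha hs
    rw [PySem.List.pyRange_one_cons (by omega)]
    simp only [List.filter_cons, decide_eq_true_eq, if_pos hs]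
    rw [ih (a+1) e (by omega) (by omega)]

-- filtering a range by (s ≤ ·) with a ≤ s ≤ e gives the sub-range from s
theorem pvFilter_range (s : Int) :
    ∀ (n : Nat) (a e : Int), (e - a).toNat = n → a ≤ s → s ≤ e →
    (PySem.List.pyRange a e 1).filter (fun i => decide (s ≤ i)) = PySem.List.pyRange s e 1 := by
  intro n
  induction n with
  | zero =>
    intro a e ha has hse
    rw [PySem.List.pyRange_one_eq_nil (show e ≤ a by omega), PySem.List.pyRange_one_eq_nil (show e ≤ s by omega)]
    rfl
  | succ n ih =>
    intro a e ha has hse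
    rw [PySem.List.pyRange_one_cons (by omega)]
    by_cases h : s ≤ a
    · have : s = a ∨ s < a := by omega
      simp only [List.filter_cons, decide_eq_true_eq, if_pos h]
      rw [pvFilter_range_all s (e - (a+1)).toNat (a+1) e rfl (by omega)]
      have hsa : a ≤ s := has
      have : s = a := le_antisymm h hsa
      subst this
      rw [← PySem.List.pyRange_one_cons (by omega)]
    · simp only [List.filter_cons, decide_eq_true_eq, if_neg h]
      exact ih (a+1) e (by omega) (by omega) hse

-- the find phase: A's loop from a with fresh state switches to the true-phase at the first found index
theorem pvFind (lines : List String) (e : Int) :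
    ∀ (n : Nat) (a : Int), (e - a).toNat = n →
    pvALoop lines (PySem.List.pyRange a e 1) [] 0 false =
      (match (PySem.List.pyRange a e 1).find?
          (fun i => PySem.Str.isIn "{" (PySem.List.pyGetD lines i "")) with
       | none => []
       | some s => pvALoop lines (PySem.List.pyRange s e 1) [] 0 true) := by
  intro n
  induction n with
  | zero =>
    intro a ha
    rw [PySem.List.pyRange_one_eq_nil (by omega)]
    rfl
  | succ n ih =>
    intro a ha
    have hlt : a < e := by omega
    rw [PySem.List.pyRange_one_cons hlt]
    by_cases hp : PySem.Str.isIn "{" (PySem.List.pyGetD lines a "") = true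
    · simp only [List.find?_cons, hp]
      conv_rhs => rw [PySem.List.pyRange_one_cons hlt]
      simp only [pvALoop, Bool.false_or, Bool.true_or, hp, if_true]
    · have hp' := Bool.eq_false_iff.mpr hp
      simp only [List.find?_cons, hp']
      simp only [pvALoop, Bool.false_or, hp']
      exact ih (a+1) (by omega)

-- B's port with its let-bindings inlined (definitional)
theorem pvAlt_eq (lines : List String) (start_line : Int) :
    extract_js_callback_body_py_alt lines start_line =
      (match ((PySem.List.pyRange start_line (min (start_line + 20) (PySem.List.len lines)) 1).filter
          (fun i => PySem.Str.isIn "{" (PySem.List.pyGetD lines i ""))).head? with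
       | none => []
       | some s =>
         let tail := ((PySem.List.pyRange start_line (min (start_line + 20) (PySem.List.len lines)) 1).filter
             (fun i => decide (s ≤ i))).map (fun i => PySem.List.pyGetD lines i "")
         tail.take (((pvAccum (tail.map pvDelta) 0).findIdx? (fun d => decide (d ≤ 0))).getD
           (tail.length - 1) + 1)) := rfl

-- ===== VERDICT =====
theorem extract_js_callback_body_py_spec : Claim_equal_extract_js_callback_body_py := by
  intro lines start_line _ _
  unfold Spec_extract_js_callback_body_py extract_js_callback_body_py
  rw [pvAlt_eq]
  set e := min (start_line + 20) (PySem.List.len lines) with he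
  rw [pvFind lines e (e - start_line).toNat start_line rfl]
  rw [pvHead_filter]
  cases hf : (PySem.List.pyRange start_line e 1).find?
      (fun i => PySem.Str.isIn "{" (PySem.List.pyGetD lines i "")) with
  | none => rfl
  | some s =>
    have hmem : s ∈ PySem.List.pyRange start_line e 1 := List.mem_of_find?_eq_some hf
    have hb := (PySem.List.mem_pyRange_one).1 hmem
    simp only
    rw [pvFilter_range s (e - start_line).toNat start_line e rfl hb.1 (by omega)]
    rw [pvALoop_true, pvCore_eq_take]
    simp
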